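-- pv_equiv track=rewrite | github.com/alnwlkr/42bangkok_discovery_piscine_python | rush/ex00/checkmate.py | diag_mv
-- ===== SOURCE A (Python) =====
-- def mvable(to_mv,all_pos):
--     if to_mv in all_pos:
--         return False
--     else:
--         return True
--
-- def diag_mv(b_pos, chess_size, all_pos, x_dir, y_dir):
--     moves = []
--     i = 1
--     while 0 < b_pos[0] + i * x_dir <= chess_size[0] and \
--             0 < b_pos[1] + i * y_dir <= chess_size[1] and \
--             mvable([b_pos[0] + i * x_dir, b_pos[1] + i * y_dir], all_pos):
--         b_temp = [b_pos[0] + i * x_dir, b_pos[1] + i * y_dir]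
--         if not mvable(b_temp,all_pos):
--             break
--         moves.append(b_temp)
--         i += 1
--     return moves
-- ===== SOURCE B (Python) =====
-- def _steps(b, s, d):
--     # number of consecutive i >= 1 with 0 < b + i*d <= s, or None if unbounded
--     if d == 0:
--         return None if 0 < b <= s else 0
--     if d > 0:
--         return max(0, (s - b) // d) if b + d > 0 else 0
--     return max(0, (b - 1) // (-d)) if b + d <= s else 0
--
-- def diag_mv(b_pos, chess_size, all_pos, x_dir, y_dir):
--     bounds = [_steps(b_pos[0], chess_size[0], x_dir), _steps(b_pos[1], chess_size[1], y_dir)]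
--     n = min(v for v in bounds if v is not None)
--     squares = [[b_pos[0] + i * x_dir, b_pos[1] + i * y_dir] for i in range(1, n + 1)]
--     free = []
--     for p in squares:
--         if p in all_pos:
--             break
--         free.append(p)
--     return free
-- ===== Notes on version B (the rewrite author's own statement) =====
-- stated objective: alternative
-- what changed: B replaces A's step-by-step while loop (re-checking board bounds every iteration) by a closed-form arithmetic computation of the number of in-bounds diagonal steps per coordinate (floor division), builds the whole in-bounds square list at once, and then takes its free prefix in a separate membership pass.
-- outside the precondition, e.g. on diag_mv([1, 1], [8, 8], [[1, 1]], 0, 0): A returns [], B raises ValueError; on diag_mv([5], [3], [], 1, 0): A returns [], B raises IndexError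
import Mathlib
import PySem

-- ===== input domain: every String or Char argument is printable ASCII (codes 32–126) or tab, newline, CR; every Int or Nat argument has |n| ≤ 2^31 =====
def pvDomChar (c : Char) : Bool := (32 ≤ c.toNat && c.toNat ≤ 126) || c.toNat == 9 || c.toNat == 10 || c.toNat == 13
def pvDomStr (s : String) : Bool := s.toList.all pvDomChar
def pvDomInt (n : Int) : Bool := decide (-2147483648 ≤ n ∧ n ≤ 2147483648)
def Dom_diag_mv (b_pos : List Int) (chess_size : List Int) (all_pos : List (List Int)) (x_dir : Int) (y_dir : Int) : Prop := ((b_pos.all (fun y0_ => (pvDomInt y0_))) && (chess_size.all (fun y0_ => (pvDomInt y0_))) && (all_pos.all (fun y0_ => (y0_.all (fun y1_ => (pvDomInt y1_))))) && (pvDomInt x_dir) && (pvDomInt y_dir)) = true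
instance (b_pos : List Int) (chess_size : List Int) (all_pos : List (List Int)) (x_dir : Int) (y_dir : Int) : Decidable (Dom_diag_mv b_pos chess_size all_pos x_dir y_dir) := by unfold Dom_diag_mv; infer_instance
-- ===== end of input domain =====

-- B computes the number of in-bounds diagonal steps in closed form (floor division) and then
-- takes the free prefix of the generated square list, instead of A's check-every-step while loop.


-- ===== PORT A =====
def pyMvable (to_mv : List Int) (all_pos : List (List Int)) : Bool :=
  if to_mv ∈ all_pos then false else true

-- A's while loop, step for step; the fuel only makes the (possibly diverging) loop total
def diagLoopA (bx byy sx sy : Int) (all_pos : List (List Int)) (xd yd : Int) : Nat → Int → List (List Int)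
  | 0, _ => []
  | fuel+1, i =>
    if (0 < bx + i * xd ∧ bx + i * xd ≤ sx) ∧ (0 < byy + i * yd ∧ byy + i * yd ≤ sy)
        ∧ pyMvable [bx + i * xd, byy + i * yd] all_pos = true then
      if ¬ (pyMvable [bx + i * xd, byy + i * yd] all_pos = true) then []
      else [bx + i * xd, byy + i * yd] :: diagLoopA bx byy sx sy all_pos xd yd fuel (i + 1)
    else []

def diag_mv (b_pos : List Int) (chess_size : List Int) (all_pos : List (List Int)) (x_dir : Int) (y_dir : Int) : List (List Int) :=
  match b_pos, chess_size with
  | bx :: byy :: _, sx :: sy :: _ => diagLoopA bx byy sx sy all_pos x_dir y_dir 17179869184 1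
  | _, _ => []   -- Python may raise IndexError here; outside Pre_

-- ===== PORT B =====
-- number of consecutive i >= 1 with 0 < b + i*d <= s; none = unbounded
def stepsB (b s d : Int) : Option Int :=
  if d = 0 then (if 0 < b ∧ b ≤ s then none else some 0)
  else if 0 < d then (if 0 < b + d then some (max 0 (PySem.Int.floordiv (s - b) d)) else some 0)
  else (if b + d ≤ s then some (max 0 (PySem.Int.floordiv (b - 1) (-d))) else some 0)

-- the prefix loop of Source B ('for p in squares: if p in all_pos: break; free.append(p)')
def freePrefix (all_pos : List (List Int)) : List (List Int) → List (List Int)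
  | [] => []
  | p :: rest => if p ∈ all_pos then [] else p :: freePrefix all_pos rest

def diag_mv_alt (b_pos : List Int) (chess_size : List Int) (all_pos : List (List Int)) (x_dir : Int) (y_dir : Int) : List (List Int) :=
  -- Source B indexes b_pos[0], b_pos[1], chess_size[0], chess_size[1]; none = IndexError, outside Pre_
  match PySem.List.pyGet? b_pos 0, PySem.List.pyGet? b_pos 1,
        PySem.List.pyGet? chess_size 0, PySem.List.pyGet? chess_size 1 with
  | some bx, some byy, some sx, some sy =>
    let bounds : List (Option Int) := [stepsB bx sx x_dir, stepsB byy sy y_dir]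
    (match PySem.List.min? (bounds.filterMap id) (fun v => v) with
     | none => []   -- Python raises ValueError (min of empty sequence); outside Pre_
     | some n =>
       freePrefix all_pos
         ((PySem.List.pyRange 1 (n+1) 1).map (fun i => [bx + i * x_dir, byy + i * y_dir])))
  | _, _, _, _ => []

-- ===== PRECONDITION & SPEC =====
-- Pre_ excludes inputs where one of the two lists has fewer than 2 entries (A sometimes raises
-- IndexError there, B always does) and the direction (0,0), on which A diverges whenever the first
-- square is in bounds and free (and B raises ValueError); on the remaining excluded inputs A returns [].
def Pre_diag_mv (b_pos : List Int) (chess_size : List Int) (all_pos : List (List Int)) (x_dir : Int) (y_dir : Int) : Prop :=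
  2 ≤ b_pos.length ∧ 2 ≤ chess_size.length ∧ (x_dir ≠ 0 ∨ y_dir ≠ 0)
instance (b_pos : List Int) (chess_size : List Int) (all_pos : List (List Int)) (x_dir : Int) (y_dir : Int) : Decidable (Pre_diag_mv b_pos chess_size all_pos x_dir y_dir) := by unfold Pre_diag_mv; infer_instance

def pvWitness_diag_mv : List Int × List Int × List (List Int) × Int × Int := ([1, 1], [4, 4], [[3, 3]], 1, 1)

def Spec_diag_mv (b_pos : List Int) (chess_size : List Int) (all_pos : List (List Int)) (x_dir : Int) (y_dir : Int) (out : List (List Int)) : Prop := out = diag_mv_alt b_pos chess_size all_pos x_dir y_dir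
instance (b_pos : List Int) (chess_size : List Int) (all_pos : List (List Int)) (x_dir : Int) (y_dir : Int) (out : List (List Int)) : Decidable (Spec_diag_mv b_pos chess_size all_pos x_dir y_dir out) := by unfold Spec_diag_mv; infer_instance

-- ===== CLAIM (what is proved, stated in full; the proofs are below) =====
def Claim_equal_diag_mv : Prop := ∀ (b_pos : List Int) (chess_size : List Int) (all_pos : List (List Int)) (x_dir : Int) (y_dir : Int), Dom_diag_mv b_pos chess_size all_pos x_dir y_dir → Pre_diag_mv b_pos chess_size all_pos x_dir y_dir → Spec_diag_mv b_pos chess_size all_pos x_dir y_dir (diag_mv b_pos chess_size all_pos x_dir y_dir)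

-- ===== LEMMAS AND PROOFS =====

theorem stepsB_none_spec (b s d : Int) (h : stepsB b s d = none) :
    d = 0 ∧ ∀ i : Int, 0 < b + i * d ∧ b + i * d ≤ s := by
  unfold stepsB at h
  split_ifs at h with h0 h1 h2 h3 h4
  · exact ⟨h0, fun i => by subst h0; simpa using h1⟩

theorem stepsB_some_spec (b s d k : Int) (h : stepsB b s d = some k) :
    0 ≤ k ∧ (∀ i : Int, 1 ≤ i → i ≤ k → 0 < b + i * d ∧ b + i * d ≤ s) ∧
      ¬(0 < b + (k + 1) * d ∧ b + (k + 1) * d ≤ s) := by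
  by_cases h0 : d = 0
  · by_cases h1 : 0 < b ∧ b ≤ s
    · simp [stepsB, h0, h1] at h
    · simp [stepsB, h0, h1] at h
      subst h0; subst h
      exact ⟨le_refl 0, fun i h1i hi0 => absurd (le_trans h1i hi0) (by norm_num),
        fun hc => h1 (by simpa using hc)⟩
  · by_cases h2 : 0 < d
    · by_cases h3 : 0 < b + d
      · simp only [stepsB, if_neg h0, if_pos h2, if_pos h3, Option.some.injEq] at h
        subst h
        set q := PySem.Int.floordiv (s - b) d with hq
        have hmul : q * d ≤ s - b := (PySem.Int.le_floordiv_iff_mul_le h2).mp le_rfl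
        have hlt : s - b < (q + 1) * d := (PySem.Int.floordiv_lt_iff_lt_mul h2).mp (by omega)
        refine ⟨le_max_left 0 q, fun i h1i hik => ?_, fun hc => ?_⟩
        · have hiq : i ≤ q := by
            rcases max_cases 0 q with ⟨he, _⟩ | ⟨he, _⟩ <;> omega
          exact ⟨by nlinarith, by nlinarith⟩
        · have hk1 : q < max 0 q + 1 := by
            rcases max_cases 0 q with ⟨he, _⟩ | ⟨he, _⟩ <;> omega
          have : s - b < (max 0 q + 1) * d := by nlinarith
          omega
      · simp only [stepsB, if_neg h0, if_pos h2, if_neg h3, Option.some.injEq] at h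
        subst h
        exact ⟨le_refl 0, fun i h1i hi0 => absurd (le_trans h1i hi0) (by norm_num),
          fun hc => by omega⟩
    · by_cases h4 : b + d ≤ s
      · simp only [stepsB, if_neg h0, if_neg h2, if_pos h4, Option.some.injEq] at h
        subst h
        have hdneg : 0 < -d := by omega
        set q := PySem.Int.floordiv (b - 1) (-d) with hq
        have hmul : q * (-d) ≤ b - 1 := (PySem.Int.le_floordiv_iff_mul_le hdneg).mp le_rfl
        have hlt : b - 1 < (q + 1) * (-d) := (PySem.Int.floordiv_lt_iff_lt_mul hdneg).mp (by omega)
        refine ⟨le_max_left 0 q, fun i h1i hik => ?_, fun hc => ?_⟩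
        · have hiq : i ≤ q := by
            rcases max_cases 0 q with ⟨he, _⟩ | ⟨he, _⟩ <;> omega
          exact ⟨by nlinarith, by nlinarith⟩
        · have hk1 : q < max 0 q + 1 := by
            rcases max_cases 0 q with ⟨he, _⟩ | ⟨he, _⟩ <;> omega
          have : b - 1 < (max 0 q + 1) * (-d) := by nlinarith
          have hneg : (max 0 q + 1) * (-d) = -((max 0 q + 1) * d) := by ring
          omega
      · simp only [stepsB, if_neg h0, if_neg h2, if_neg h4, Option.some.injEq] at h
        subst h
        exact ⟨le_refl 0, fun i h1i hi0 => absurd (le_trans h1i hi0) (by norm_num),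
          fun hc => by omega⟩

theorem stepsB_le (b s d k : Int) (h : stepsB b s d = some k) :
    k ≤ max 0 (s - b) + max 0 (b - 1) := by
  have hb1 : (0:Int) ≤ max 0 (b - 1) := le_max_left _ _
  have hsb : (0:Int) ≤ max 0 (s - b) := le_max_left _ _
  by_cases h0 : d = 0
  · by_cases h1 : 0 < b ∧ b ≤ s
    · simp [stepsB, h0, h1] at h
    · simp [stepsB, h0, h1] at h; omega
  · by_cases h2 : 0 < d
    · by_cases h3 : 0 < b + d
      · simp only [stepsB, if_neg h0, if_pos h2, if_pos h3, Option.some.injEq] at h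
        subst h
        have hmul : PySem.Int.floordiv (s - b) d * d ≤ s - b :=
          (PySem.Int.le_floordiv_iff_mul_le h2).mp le_rfl
        have hfle : PySem.Int.floordiv (s - b) d ≤ max 0 (s - b) := by
          rcases le_or_gt (PySem.Int.floordiv (s - b) d) 0 with hq | hq
          · omega
          · nlinarith [le_max_right (0:Int) (s - b)]
        rcases max_cases 0 (PySem.Int.floordiv (s - b) d) with ⟨he, _⟩ | ⟨he, _⟩ <;> omega
      · simp only [stepsB, if_neg h0, if_pos h2, if_neg h3, Option.some.injEq] at h
        omega
    · by_cases h4 : b + d ≤ s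
      · simp only [stepsB, if_neg h0, if_neg h2, if_pos h4, Option.some.injEq] at h
        subst h
        have hdneg : 0 < -d := by omega
        have hmul : PySem.Int.floordiv (b - 1) (-d) * (-d) ≤ b - 1 :=
          (PySem.Int.le_floordiv_iff_mul_le hdneg).mp le_rfl
        have hfle : PySem.Int.floordiv (b - 1) (-d) ≤ max 0 (b - 1) := by
          rcases le_or_gt (PySem.Int.floordiv (b - 1) (-d)) 0 with hq | hq
          · omega
          · nlinarith [le_max_right (0:Int) (b - 1)]
        rcases max_cases 0 (PySem.Int.floordiv (b - 1) (-d)) with ⟨he, _⟩ | ⟨he, _⟩ <;> omega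
      · simp only [stepsB, if_neg h0, if_neg h2, if_neg h4, Option.some.injEq] at h
        omega

theorem loopA_eq_freePrefix (bx byy sx sy xd yd n : Int) (all_pos : List (List Int))
    (hin : ∀ i : Int, 1 ≤ i → i ≤ n →
      (0 < bx + i * xd ∧ bx + i * xd ≤ sx) ∧ (0 < byy + i * yd ∧ byy + i * yd ≤ sy))
    (hout : ¬((0 < bx + (n + 1) * xd ∧ bx + (n + 1) * xd ≤ sx) ∧
      (0 < byy + (n + 1) * yd ∧ byy + (n + 1) * yd ≤ sy))) :
    ∀ (fuel : Nat) (i : Int), 1 ≤ i → i ≤ n + 1 → (n + 1 - i).toNat < fuel →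
      diagLoopA bx byy sx sy all_pos xd yd fuel i =
        freePrefix all_pos ((PySem.List.pyRange i (n + 1) 1).map
          (fun j => [bx + j * xd, byy + j * yd])) := by
  intro fuel
  induction fuel with
  | zero => intro i _ _ hf; omega
  | succ fuel ih =>
    intro i h1 h2 hf
    rcases lt_or_eq_of_le h2 with hi | hi
    · -- i ≤ n: one real step
      have hb := hin i h1 (by omega)
      rw [PySem.List.pyRange_one_cons (by omega : i < n + 1), List.map_cons]
      by_cases hm : [bx + i * xd, byy + i * yd] ∈ all_pos
      · simp [diagLoopA, pyMvable, freePrefix, hm]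
      · have hrec := ih (i + 1) (by omega) (by omega) (by omega)
        simp [diagLoopA, pyMvable, freePrefix, hm, hb.1.1, hb.1.2, hb.2.1, hb.2.2, hrec]

    · -- i = n + 1: loop condition fails, range is empty
      subst hi
      rw [PySem.List.pyRange_one_eq_nil (le_refl (n + 1))]
      simp only [List.map_nil, freePrefix, diagLoopA]
      rw [if_neg]
      intro hc
      exact hout ⟨hc.1, hc.2.1⟩

theorem diag_mv_main (bx byy sx sy xd yd : Int) (brest crest : List Int) (all_pos : List (List Int))
    (hdir : xd ≠ 0 ∨ yd ≠ 0)
    (hbx : bx ≤ 2147483648) (hsx : sx ≤ 2147483648) (hbx' : -2147483648 ≤ bx)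
    (hby : byy ≤ 2147483648) (hsy : sy ≤ 2147483648) (hby' : -2147483648 ≤ byy) :
    diag_mv (bx :: byy :: brest) (sx :: sy :: crest) all_pos xd yd =
      diag_mv_alt (bx :: byy :: brest) (sx :: sy :: crest) all_pos xd yd := by
  have e0 : PySem.List.pyGet? (bx :: byy :: brest) 0 = some bx := by
    simp
  have e1 : PySem.List.pyGet? (bx :: byy :: brest) 1 = some byy := by
    simp
  have e2 : PySem.List.pyGet? (sx :: sy :: crest) 0 = some sx := by
    simp
  have e3 : PySem.List.pyGet? (sx :: sy :: crest) 1 = some sy := by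
    simp
  simp only [diag_mv, diag_mv_alt, e0, e1, e2, e3]
  rcases hx : stepsB bx sx xd with _ | k1 <;> rcases hy : stepsB byy sy yd with _ | k2
  · -- both none: both directions are 0, contradicting hdir
    exact absurd hdir (by
      have h1 := (stepsB_none_spec _ _ _ hx).1
      have h2 := (stepsB_none_spec _ _ _ hy).1
      simp [h1, h2])
  · -- x unbounded, y gives the bound k2
    have hxs := stepsB_none_spec _ _ _ hx
    have hys := stepsB_some_spec _ _ _ _ hy
    have hle := stepsB_le _ _ _ _ hy
    simp only [List.filterMap_cons, List.filterMap_nil, id_eq, PySem.List.min?_id_cons, List.foldl_nil]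
    rw [loopA_eq_freePrefix bx byy sx sy xd yd k2 all_pos
      (fun i h1i hik => ⟨hxs.2 i, hys.2.1 i h1i hik⟩)
      (fun hc => hys.2.2 hc.2) 17179869184 1 le_rfl (by omega) ?_]
    rcases max_cases (0:Int) (sy - byy) with ⟨he1, -⟩ | ⟨he1, -⟩ <;>
      rcases max_cases (0:Int) (byy - 1) with ⟨he2, -⟩ | ⟨he2, -⟩ <;> omega
  · -- y unbounded, x gives the bound k1
    have hxs := stepsB_some_spec _ _ _ _ hx
    have hys := stepsB_none_spec _ _ _ hy
    have hle := stepsB_le _ _ _ _ hx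
    simp only [List.filterMap_cons, List.filterMap_nil, id_eq, PySem.List.min?_id_cons, List.foldl_nil]
    rw [loopA_eq_freePrefix bx byy sx sy xd yd k1 all_pos
      (fun i h1i hik => ⟨hxs.2.1 i h1i hik, hys.2 i⟩)
      (fun hc => hxs.2.2 hc.1) 17179869184 1 le_rfl (by omega) ?_]
    rcases max_cases (0:Int) (sx - bx) with ⟨he1, -⟩ | ⟨he1, -⟩ <;>
      rcases max_cases (0:Int) (bx - 1) with ⟨he2, -⟩ | ⟨he2, -⟩ <;> omega
  · -- both bounded: n = min k1 k2
    have hxs := stepsB_some_spec _ _ _ _ hx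
    have hys := stepsB_some_spec _ _ _ _ hy
    have hle := stepsB_le _ _ _ _ hx
    simp only [List.filterMap_cons, List.filterMap_nil, id_eq, PySem.List.min?_id_cons,
      List.foldl_cons, List.foldl_nil]
    have hout : ¬((0 < bx + (min k1 k2 + 1) * xd ∧ bx + (min k1 k2 + 1) * xd ≤ sx) ∧
        (0 < byy + (min k1 k2 + 1) * yd ∧ byy + (min k1 k2 + 1) * yd ≤ sy)) := by
      rcases le_total k1 k2 with hm | hm
      · rw [min_eq_left hm]; exact fun hc => hxs.2.2 hc.1
      · rw [min_eq_right hm]; exact fun hc => hys.2.2 hc.2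
    rw [loopA_eq_freePrefix bx byy sx sy xd yd (min k1 k2) all_pos
      (fun i h1i hik => ⟨hxs.2.1 i h1i (le_trans hik (min_le_left _ _)),
        hys.2.1 i h1i (le_trans hik (min_le_right _ _))⟩)
      hout 17179869184 1 le_rfl (by have := hxs.1; have := hys.1; omega) ?_]
    have hmin : min k1 k2 ≤ k1 := min_le_left _ _
    rcases max_cases (0:Int) (sx - bx) with ⟨he1, -⟩ | ⟨he1, -⟩ <;>
      rcases max_cases (0:Int) (bx - 1) with ⟨he2, -⟩ | ⟨he2, -⟩ <;> omega

-- ===== VERDICT (by name: the statement is the Claim_ definition above) =====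
theorem diag_mv_spec : Claim_equal_diag_mv := by
  intro b_pos chess_size all_pos x_dir y_dir hDom hPre
  unfold Spec_diag_mv
  obtain ⟨hbl, hcl, hdir⟩ := hPre
  rcases b_pos with _ | ⟨bx, bt⟩
  · simp at hbl
  rcases bt with _ | ⟨byy, brest⟩
  · simp at hbl
  rcases chess_size with _ | ⟨sx, ct⟩
  · simp at hcl
  rcases ct with _ | ⟨sy, crest⟩
  · simp at hcl
  simp only [Dom_diag_mv, List.all_cons, Bool.and_eq_true, pvDomInt,
    decide_eq_true_eq] at hDom
  refine diag_mv_main bx byy sx sy x_dir y_dir brest crest all_pos hdir ?_ ?_ ?_ ?_ ?_ ?_ <;> omega
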